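-- pv_equiv track=rewrite | github.com/gregchapman-dev/converter21 | tests/Utilities.py | generateExpectedTokenStrings
-- ===== SOURCE A (Python) =====
-- def generateExpectedTokenStrings(stringListChanges: dict, lineCount: int) -> [list]:
--     result = [['']] * lineCount # a single empty token on every line
--     changeLineNumbers = []
--     # We want integers for sorting and comparison with lineNumbers, but the keys are strings representing integers.
--     # Note that python allows integer keys, but we store these in JSON files, and JSON does not allow that.
--     for key in list(stringListChanges.keys()):
--         changeLineNumbers.append(int(key))
--     changeLineNumbers.sort()
--     changeLineNumbers_Idx: int = 0
--     currValue: [str] = ['']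
--     for lineIdx in range(0, lineCount):
--         lineNumber = lineIdx+1  # lineNumber is 1-based, lineIdx is 0-based
--         if changeLineNumbers_Idx < len(changeLineNumbers) and lineNumber == changeLineNumbers[changeLineNumbers_Idx]:
--             currValue = stringListChanges[str(lineNumber)] # back to str for a key
--             changeLineNumbers_Idx += 1
--         result[lineIdx] = currValue
--     return result
-- ===== SOURCE B (Python) =====
-- def generateExpectedTokenStrings(stringListChanges: dict, lineCount: int) -> [list]:
--     # Run-length construction: sort the in-range changes once, then emit whole
--     # constant segments between consecutive change lines (no per-line scan).
--     changes = sorted(((int(k), v) for k, v in stringListChanges.items()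
--                       if 1 <= int(k) <= lineCount), key=lambda p: p[0])
--     result = []
--     pos = 0          # number of lines emitted so far
--     value = ['']
--     for n, v in changes:
--         result += [value] * (n - 1 - pos)
--         pos = n - 1
--         value = v
--     result += [value] * (lineCount - pos)
--     return result
-- ===== Notes on version B (the rewrite author's own statement) =====
-- stated objective: alternative
-- what changed: B replaces A's per-line scan (which walks every line testing it against a sorted key list with an advancing pointer) by a run-length construction: it sorts the in-range changes once and emits each constant segment between consecutive change lines wholesale with list repetition, iterating over the changes instead of the lines.
-- intended difference: On inputs containing a change key that parses to a non-positive line number alongside an in-range change with a non-[''] value, A's sorted pointer sticks on the non-positive entry and silently ignores ALL changes (returning [['']]*lineCount), while B applies the in-range changes, which is the intended behaviour. — e.g. on generateExpectedTokenStrings([("0", ["x"]), ("2", ["y"])], 3): A returns [[""], [""], [""]], B returns [[""], ["y"], ["y"]]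
-- outside the precondition, e.g. on generateExpectedTokenStrings({'2': ['a'], '+2': ['b']}, 3): A returns [[''], ['a'], ['a']], B returns [[''], ['b'], ['b']]
import Mathlib
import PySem

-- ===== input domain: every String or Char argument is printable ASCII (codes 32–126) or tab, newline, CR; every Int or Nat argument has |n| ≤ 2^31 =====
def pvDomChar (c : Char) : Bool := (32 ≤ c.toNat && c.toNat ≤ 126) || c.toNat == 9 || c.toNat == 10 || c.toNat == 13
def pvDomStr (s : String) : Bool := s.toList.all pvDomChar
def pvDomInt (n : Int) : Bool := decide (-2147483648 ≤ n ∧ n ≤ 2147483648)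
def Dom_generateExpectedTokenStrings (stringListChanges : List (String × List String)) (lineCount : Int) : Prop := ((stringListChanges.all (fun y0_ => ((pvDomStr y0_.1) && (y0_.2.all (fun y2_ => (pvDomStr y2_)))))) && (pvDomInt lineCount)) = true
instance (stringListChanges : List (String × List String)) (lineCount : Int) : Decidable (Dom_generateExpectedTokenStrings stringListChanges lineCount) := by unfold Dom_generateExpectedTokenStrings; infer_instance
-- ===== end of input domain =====

-- B replaces A's per-line scan with pointer machinery by a run-length construction:
-- sort the in-range changes once, then emit each constant segment between consecutive
-- change lines wholesale (objective: alternative; equal return values on Pre_ outside D_).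

-- ===== PORT A =====
-- int(key): the none case (ValueError) is excluded by Pre_generateExpectedTokenStrings
def pvParse (k : String) : Int := (PySem.Int.ofStr? k).getD 0

-- loop body of A's 'for lineIdx in range(0, lineCount)'; state = (result, changeLineNumbers_Idx, currValue)
def pvStepA (d : PySem.Dict String (List String)) (s : List Int)
    (st : List (List String) × Int × List String) (lineIdx : Int) :
    List (List String) × Int × List String :=
  let lineNumber := lineIdx + 1
  if st.2.1 < (s.length : Int) ∧ PySem.List.pyGet? s st.2.1 = some lineNumber then
    -- stringListChanges[str(lineNumber)]: the none case (KeyError) is excluded by Pre_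
    let currValue := (d.get? (PySem.Int.toStr lineNumber)).getD [""]
    (st.1.set lineIdx.toNat currValue, st.2.1 + 1, currValue)
  else
    (st.1.set lineIdx.toNat st.2.2, st.2.1, st.2.2)

def generateExpectedTokenStrings (stringListChanges : List (String × List String)) (lineCount : Int) : List (List String) :=
  let d := PySem.Dict.mk stringListChanges
  let result := PySem.List.pyRepeat [[""]] lineCount
  let changeLineNumbers := d.keys.foldl (fun acc key => acc ++ [pvParse key]) []
  let s := PySem.List.sorted changeLineNumbers (fun x => x) false
  ((PySem.List.pyRange 0 lineCount 1).foldl (pvStepA d s) (result, 0, [""])).1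

-- ===== PORT B =====
-- B's 'sorted((int(k), v) for k, v in ... if 1 <= int(k) <= lineCount, key=lambda p: p[0])'
def pvChangesB (ps : List (String × List String)) (L : Int) : List (Int × List String) :=
  PySem.List.sorted
    ((ps.filter (fun p => decide (1 ≤ pvParse p.1) && decide (pvParse p.1 ≤ L))).map
      (fun p => (pvParse p.1, p.2)))
    (fun q => q.1) false

-- loop body of B's 'for n, v in changes'; state = (result, pos, value)
def pvStepBseg (st : List (List String) × Int × List String) (q : Int × List String) :
    List (List String) × Int × List String :=
  (st.1 ++ PySem.List.pyRepeat [st.2.2] (q.1 - 1 - st.2.1), q.1 - 1, q.2)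

def generateExpectedTokenStrings_alt (stringListChanges : List (String × List String)) (lineCount : Int) : List (List String) :=
  let changes := pvChangesB stringListChanges lineCount
  let st := changes.foldl pvStepBseg ([], 0, [""])
  st.1 ++ PySem.List.pyRepeat [st.2.2] (lineCount - st.2.1)

-- ===== PRECONDITION & SPEC =====
-- Pre_ excludes exactly: keys int() cannot parse (A raises ValueError), keys that collide after
-- parsing or repeat as strings (a dict cannot carry duplicate keys; PySem's assoc-list dict assumes
-- them unique), and -- when every key is positive -- non-canonical keys within range, on which A's
-- pointer inevitably lands and raises KeyError at the str(lineNumber) lookup.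
def Pre_generateExpectedTokenStrings (stringListChanges : List (String × List String)) (lineCount : Int) : Prop :=
  (stringListChanges.map Prod.fst).Nodup
  ∧ (∀ p ∈ stringListChanges, (PySem.Int.ofStr? p.1).isSome = true)
  ∧ (stringListChanges.map (fun p => pvParse p.1)).Nodup
  ∧ ((∀ p ∈ stringListChanges, 1 ≤ pvParse p.1) →
      ∀ p ∈ stringListChanges, pvParse p.1 ≤ lineCount → PySem.Int.toStr (pvParse p.1) = p.1)

instance (stringListChanges : List (String × List String)) (lineCount : Int) : Decidable (Pre_generateExpectedTokenStrings stringListChanges lineCount) := by unfold Pre_generateExpectedTokenStrings; infer_instance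

def pvWitness_generateExpectedTokenStrings : (List (String × List String)) × Int :=
  ([("2", ["a", "b"]), ("4", ["c"])], 5)

-- On inputs that contain a change key parsing to a non-positive line number next to an in-range
-- change with a non-trivial value, A's sorted pointer sticks on the non-positive entry forever and
-- silently ignores ALL changes, returning [['']]*lineCount; B applies the in-range changes, which
-- is the intended behaviour of the function.
def D_generateExpectedTokenStrings (stringListChanges : List (String × List String)) (lineCount : Int) : Prop :=
  (∃ p ∈ stringListChanges, pvParse p.1 ≤ 0)
  ∧ (∃ q ∈ stringListChanges, 1 ≤ pvParse q.1 ∧ pvParse q.1 ≤ lineCount ∧ q.2 ≠ [""])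

instance (stringListChanges : List (String × List String)) (lineCount : Int) : Decidable (D_generateExpectedTokenStrings stringListChanges lineCount) := by unfold D_generateExpectedTokenStrings; infer_instance

def Spec_generateExpectedTokenStrings (stringListChanges : List (String × List String)) (lineCount : Int) (out : List (List String)) : Prop := ¬ D_generateExpectedTokenStrings stringListChanges lineCount → out = generateExpectedTokenStrings_alt stringListChanges lineCount
instance (stringListChanges : List (String × List String)) (lineCount : Int) (out : List (List String)) : Decidable (Spec_generateExpectedTokenStrings stringListChanges lineCount out) := by unfold Spec_generateExpectedTokenStrings; infer_instance

def pvDiffWitness_generateExpectedTokenStrings : (List (String × List String)) × Int :=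
  ([("0", ["x"]), ("2", ["y"])], 3)

def pvDiffWitnessOut_generateExpectedTokenStrings : (List (List String)) × (List (List String)) :=
  ([[""], [""], [""]], [[""], ["y"], ["y"]])

-- ===== CLAIM (what is proved, stated in full; the proofs are below) =====
def Claim_unchanged_generateExpectedTokenStrings : Prop := ∀ (stringListChanges : List (String × List String)) (lineCount : Int), Dom_generateExpectedTokenStrings stringListChanges lineCount → Pre_generateExpectedTokenStrings stringListChanges lineCount → Spec_generateExpectedTokenStrings stringListChanges lineCount (generateExpectedTokenStrings stringListChanges lineCount)
def Claim_changed_generateExpectedTokenStrings : Prop := Dom_generateExpectedTokenStrings (pvDiffWitness_generateExpectedTokenStrings.1) (pvDiffWitness_generateExpectedTokenStrings.2) ∧ Pre_generateExpectedTokenStrings (pvDiffWitness_generateExpectedTokenStrings.1) (pvDiffWitness_generateExpectedTokenStrings.2) ∧ D_generateExpectedTokenStrings (pvDiffWitness_generateExpectedTokenStrings.1) (pvDiffWitness_generateExpectedTokenStrings.2) ∧ generateExpectedTokenStrings (pvDiffWitness_generateExpectedTokenStrings.1) (pvDiffWitness_generateExpectedTokenStrings.2) = pvDiffWitnessOut_generateExpectedTokenStrings.1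 ∧ generateExpectedTokenStrings_alt (pvDiffWitness_generateExpectedTokenStrings.1) (pvDiffWitness_generateExpectedTokenStrings.2) = pvDiffWitnessOut_generateExpectedTokenStrings.2 ∧ pvDiffWitnessOut_generateExpectedTokenStrings.1 ≠ pvDiffWitnessOut_generateExpectedTokenStrings.2
def Claim_exact_generateExpectedTokenStrings : Prop := ∀ (stringListChanges : List (String × List String)) (lineCount : Int), Dom_generateExpectedTokenStrings stringListChanges lineCount → Pre_generateExpectedTokenStrings stringListChanges lineCount → D_generateExpectedTokenStrings stringListChanges lineCount → generateExpectedTokenStrings stringListChanges lineCount ≠ generateExpectedTokenStrings_alt stringListChanges lineCount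

-- ===== LEMMAS AND PROOFS =====

-- proof-only middle layer: a per-line fill over an int-keyed dict of the changes
-- (state = (result, currValue)); both ports are related to it
def pvChangeDict (ps : List (String × List String)) : PySem.Dict Int (List String) :=
  ps.foldl (fun (ch : PySem.Dict Int (List String)) p => ch.insert (pvParse p.1) p.2) PySem.Dict.empty

def pvStepB (changes : PySem.Dict Int (List String))
    (st : List (List String) × List String) (n : Int) : List (List String) × List String :=
  match changes.get? n with
  | some v => (st.1 ++ [v], v)
  | none => (st.1 ++ [st.2], st.2)

-- recursive form of B's segment emission
def pvFill (L : Int) (pos : Int) (v : List String) : List (Int × List String) → List (List String)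
  | [] => List.replicate (L - pos).toNat v
  | (n, w) :: rest => List.replicate (n - 1 - pos).toNat v ++ pvFill L (n - 1) w rest

-- number of elements of s strictly below n (A's pointer position before processing line n)
def pvFiltLt (s : List Int) (n : Int) : Nat := (s.filter (fun x => decide (x < n))).length

lemma pv_filtLt_base (s : List Int) (h1 : ∀ x ∈ s, 1 ≤ x) : pvFiltLt s 1 = 0 := by
  unfold pvFiltLt
  rw [List.length_eq_zero_iff, List.filter_eq_nil_iff]
  intro x hx
  simpa using h1 x hx

lemma pv_filtLt_succ (s : List Int) (hnd : s.Nodup) (n : Int) :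
    pvFiltLt s (n + 1) = pvFiltLt s n + (if n ∈ s then 1 else 0) := by
  unfold pvFiltLt
  rw [← List.countP_eq_length_filter, ← List.countP_eq_length_filter]
  induction s with
  | nil => simp
  | cons a t ih =>
    rw [List.nodup_cons] at hnd
    obtain ⟨hat, hndt⟩ := hnd
    have iht := ih hndt
    simp only [List.countP_cons, List.mem_cons]
    by_cases han : n = a
    · subst han
      simp only [true_or, if_pos]
      have e1 : decide (n < n + 1) = true := by simp
      have e2 : decide (n < n) = false := by simp
      rw [e1, e2]
      simp only [if_true, Bool.false_eq_true, if_false]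
      rw [if_neg hat] at iht
      omega
    · have e : decide (a < n + 1) = decide (a < n) := by
        by_cases h : a < n
        · have : a < n + 1 := by omega
          simp [h, this]
        · have : ¬ a < n + 1 := by omega
          simp [h, this]
      rw [e]
      simp only [han, false_or]
      by_cases hm : n ∈ t
      · rw [if_pos hm] at iht ⊢
        omega
      · rw [if_neg hm] at iht ⊢
        omega

-- A's pointer test at line n: with the pointer at pvFiltLt s n, it fires iff n is a change line
lemma pv_ptr_hit (s : List Int) (hs : s.Pairwise (· < ·)) (n : Int) :
    (((pvFiltLt s n : Nat) : Int) < (s.length : Int)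
      ∧ PySem.List.pyGet? s ((pvFiltLt s n : Nat) : Int) = some n) ↔ n ∈ s := by
  induction s with
  | nil => simp [pvFiltLt, PySem.List.pyGet?]
  | cons a t ih =>
    rw [List.pairwise_cons] at hs
    obtain ⟨ha, hst⟩ := hs
    rw [PySem.List.pyGet?_natCast]
    rw [PySem.List.pyGet?_natCast] at ih
    by_cases h : a < n
    · have hf : pvFiltLt (a :: t) n = pvFiltLt t n + 1 := by
        unfold pvFiltLt; simp [h]
      rw [hf]
      have hget : (a :: t)[pvFiltLt t n + 1]? = t[pvFiltLt t n]? := by simp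
      rw [hget]
      have hiff := ih hst
      simp only [List.length_cons, List.mem_cons]
      constructor
      · rintro ⟨h1, h2⟩
        right; exact hiff.mp ⟨by push_cast at h1 ⊢; omega, h2⟩
      · rintro (rfl | hm)
        · omega
        · obtain ⟨h1, h2⟩ := hiff.mpr hm
          exact ⟨by push_cast at h1 ⊢; omega, h2⟩
    · have hf : pvFiltLt (a :: t) n = 0 := by
        unfold pvFiltLt
        rw [List.length_eq_zero_iff, List.filter_eq_nil_iff]
        intro x hx
        rcases List.mem_cons.mp hx with rfl | hx'
        · simp; omega
        · have := ha x hx'; simp; omega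
      rw [hf]
      simp only [Nat.cast_zero, List.length_cons, List.mem_cons]
      constructor
      · rintro ⟨h1, h2⟩
        simp at h2
        left; omega
      · rintro (rfl | hm)
        · refine ⟨by push_cast; omega, by simp⟩
        · exfalso; have := ha n hm; omega

-- the middle dict looks up the first (= unique) entry whose key parses to n
lemma pv_changes_get? (ps : List (String × List String)) (n : Int)
    (hnd : (ps.map (fun p => pvParse p.1)).Nodup) (ch : PySem.Dict Int (List String)) :
    (ps.foldl (fun (ch : PySem.Dict Int (List String)) p => ch.insert (pvParse p.1) p.2) ch).get? n
      = match ps.find? (fun p => pvParse p.1 == n) with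
        | some p => some p.2
        | none => ch.get? n := by
  induction ps generalizing ch with
  | nil => simp
  | cons p t ih =>
    rw [List.map_cons, List.nodup_cons] at hnd
    obtain ⟨hpt, hndt⟩ := hnd
    rw [List.foldl_cons, ih hndt, List.find?_cons]
    by_cases h : pvParse p.1 = n
    · have hb : (pvParse p.1 == n) = true := by simp [h]
      rw [hb]
      have hnone : t.find? (fun q => pvParse q.1 == n) = none := by
        rw [List.find?_eq_none]
        intro q hq
        simp only [beq_iff_eq]
        intro he
        apply hpt
        rw [h, ← he]
        exact List.mem_map_of_mem hq
      rw [hnone]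
      simp [h, PySem.Dict.get?_insert_self]
    · have hb : (pvParse p.1 == n) = false := by simp [h]
      rw [hb]
      cases hf : t.find? (fun q => pvParse q.1 == n) with
      | some q => simp
      | none => simp [PySem.Dict.get?_insert_of_ne ch p.2 (fun he => h he.symm)]

-- when n is a change line (n within 1..L, all keys positive), both A's string lookup and
-- the middle dict's int lookup return that entry's value
lemma pv_hit (ps : List (String × List String)) (L : Int)
    (hnd : (ps.map Prod.fst).Nodup)
    (hnum : (ps.map (fun p => pvParse p.1)).Nodup)
    (hcanonL : ∀ p ∈ ps, pvParse p.1 ≤ L → PySem.Int.toStr (pvParse p.1) = p.1)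
    (n : Int) (hn : n ∈ ps.map (fun p => pvParse p.1)) (hnL : n ≤ L) :
    ∃ v, (pvChangeDict ps).get? n = some v
      ∧ (PySem.Dict.mk ps).get? (PySem.Int.toStr n) = some v := by
  cases hf : ps.find? (fun p => pvParse p.1 == n) with
  | none =>
    exfalso
    obtain ⟨p, hp, hpn⟩ := List.mem_map.mp hn
    have := List.find?_eq_none.mp hf p hp
    simp [hpn] at this
  | some q =>
    have hq : q ∈ ps := List.mem_of_find?_eq_some hf
    have hqn : pvParse q.1 = n := by simpa using List.find?_some hf
    have hkey : PySem.Int.toStr n = q.1 := by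
      rw [← hqn]; exact hcanonL q hq (by rw [hqn]; exact hnL)
    refine ⟨q.2, ?_, ?_⟩
    · rw [pvChangeDict, pv_changes_get? ps n hnum, hf]
    · rw [hkey]
      have hitems : (q.1, q.2) ∈ (PySem.Dict.mk ps).items := by simpa using hq
      have hknd : (PySem.Dict.mk ps).keys.Nodup := by
        rw [PySem.Dict.keys_mk]
        exact hnd
      exact PySem.Dict.get?_of_mem_items _ hitems hknd

lemma pv_miss (ps : List (String × List String))
    (hnum : (ps.map (fun p => pvParse p.1)).Nodup)
    (n : Int) (hn : n ∉ ps.map (fun p => pvParse p.1)) :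
    (pvChangeDict ps).get? n = none := by
  rw [pvChangeDict, pv_changes_get? ps n hnum]
  cases hf : ps.find? (fun p => pvParse p.1 == n) with
  | some q =>
    exfalso
    apply hn
    have hq : q ∈ ps := List.mem_of_find?_eq_some hf
    have hqn : pvParse q.1 = n := by simpa using List.find?_some hf
    exact List.mem_map.mpr ⟨q, hq, hqn⟩
  | none => rfl

-- every entry of the change dict is retrievable by its parsed line number
lemma pv_get_self (ps : List (String × List String))
    (hnum : (ps.map (fun p => pvParse p.1)).Nodup)
    (q : String × List String) (hq : q ∈ ps) :
    (pvChangeDict ps).get? (pvParse q.1) = some q.2 := by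
  rw [pvChangeDict, pv_changes_get? ps _ hnum]
  cases hf : ps.find? (fun p => pvParse p.1 == pvParse q.1) with
  | none =>
    exfalso
    have := List.find?_eq_none.mp hf q hq
    simp at this
  | some q' =>
    have hq' : q' ∈ ps := List.mem_of_find?_eq_some hf
    have hqn : pvParse q'.1 = pvParse q.1 := by simpa using List.find?_some hf
    have : q' = q := List.inj_on_of_nodup_map hnum hq' hq hqn
    rw [this]

-- A's per-line pointer loop computes the same as the middle per-line dict fill
lemma pv_loop (ps : List (String × List String)) (L : Int)
    (hnd : (ps.map Prod.fst).Nodup)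
    (hnum : (ps.map (fun p => pvParse p.1)).Nodup)
    (hcanonL : ∀ p ∈ ps, pvParse p.1 ≤ L → PySem.Int.toStr (pvParse p.1) = p.1)
    (hpos : ∀ p ∈ ps, 1 ≤ pvParse p.1)
    (s : List Int)
    (hs : s = PySem.List.sorted (ps.map (fun p => pvParse p.1)) (fun x => x) false) :
    ∀ m : Nat, m ≤ L.toNat →
    ∃ acc cur,
      (PySem.List.pyRange 1 ((m : Int) + 1) 1).foldl (pvStepB (pvChangeDict ps)) ([], [""]) = (acc, cur)
      ∧ acc.length = m
      ∧ (PySem.List.pyRange 0 (m : Int) 1).foldl (pvStepA (PySem.Dict.mk ps) s)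
          (List.replicate L.toNat [""], 0, [""])
        = (acc ++ List.replicate (L.toNat - m) [""], ((pvFiltLt s ((m : Int) + 1) : Nat) : Int), cur) := by
  have hmem : ∀ x, x ∈ s ↔ x ∈ ps.map (fun p => pvParse p.1) := by
    intro x; rw [hs]; exact PySem.List.mem_sorted _ _ _ x
  have hone : ∀ x ∈ s, 1 ≤ x := by
    intro x hx
    obtain ⟨p, hp, hpx⟩ := List.mem_map.mp ((hmem x).mp hx)
    rw [← hpx]
    exact hpos p hp
  have hsnd : s.Nodup := by
    rw [hs]
    exact (PySem.List.sorted_perm _ _ _).nodup_iff.mpr hnum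
  have hpw : s.Pairwise (· < ·) := by
    have hle : s.Pairwise (· ≤ ·) := by
      rw [hs]
      simpa using PySem.List.sorted_pairwise (ps.map (fun p => pvParse p.1)) (fun x => x)
    exact (hle.and hsnd).imp (fun h => lt_of_le_of_ne h.1 h.2)
  intro m
  induction m with
  | zero =>
    intro _
    refine ⟨[], [""], ?_, rfl, ?_⟩
    · rw [PySem.List.pyRange_one_eq_nil (by omega)]
      rfl
    · rw [PySem.List.pyRange_one_eq_nil (by omega)]
      simp [pv_filtLt_base s hone]
  | succ m ih =>
    intro hm
    push_cast
    obtain ⟨acc, cur, hB, hlen, hA⟩ := ih (by omega)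
    have hrangeA : PySem.List.pyRange 0 ((m : Int) + 1) 1
        = PySem.List.pyRange 0 (m : Int) 1 ++ [(m : Int)] :=
      PySem.List.pyRange_one_succ_right (a := 0) (b := (m : Int)) (by positivity)
    have hrangeB : PySem.List.pyRange 1 ((m : Int) + 1 + 1) 1
        = PySem.List.pyRange 1 ((m : Int) + 1) 1 ++ [(m : Int) + 1] :=
      PySem.List.pyRange_one_succ_right (a := 1) (b := (m : Int) + 1) (by omega)
    have hmlt : m < L.toNat := by omega
    have hrep : List.replicate (L.toNat - m) ([""] : List String)
        = [""] :: List.replicate (L.toNat - (m + 1)) [""] := by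
      have : L.toNat - m = (L.toNat - (m + 1)) + 1 := by omega
      rw [this, List.replicate_succ]
    by_cases hin : ((m : Int) + 1) ∈ s
    · obtain ⟨v, hget, hgetA⟩ := pv_hit ps L hnd hnum hcanonL ((m : Int) + 1)
        ((hmem _).mp hin) (by omega)
      refine ⟨acc ++ [v], v, ?_, by simp [hlen], ?_⟩
      · rw [hrangeB, List.foldl_append, hB]
        simp [pvStepB, hget]
      · rw [hrangeA, List.foldl_append, hA]
        simp only [List.foldl_cons, List.foldl_nil]
        rw [pvStepA]
        rw [if_pos (by exact (pv_ptr_hit s hpw ((m : Int) + 1)).mpr hin)]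
        simp only [hgetA, Option.getD_some]
        have hset : (acc ++ List.replicate (L.toNat - m) ([""] : List String)).set (m : Int).toNat v
            = (acc ++ [v]) ++ List.replicate (L.toNat - (m + 1)) [""] := by
          rw [hrep, Int.toNat_natCast, ← hlen]
          simp
        rw [hset]
        have hidx : ((pvFiltLt s ((m : Int) + 1) : Nat) : Int) + 1
            = ((pvFiltLt s ((m : Int) + 1 + 1) : Nat) : Int) := by
          rw [pv_filtLt_succ s hsnd ((m : Int) + 1), if_pos hin]
          push_cast
          ring
        rw [hidx]
    · have hget := pv_miss ps hnum ((m : Int) + 1) (fun h => hin ((hmem _).mpr h))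
      refine ⟨acc ++ [cur], cur, ?_, by simp [hlen], ?_⟩
      · rw [hrangeB, List.foldl_append, hB]
        simp [pvStepB, hget]
      · rw [hrangeA, List.foldl_append, hA]
        simp only [List.foldl_cons, List.foldl_nil]
        rw [pvStepA]
        rw [if_neg (by
          intro hc
          exact hin ((pv_ptr_hit s hpw ((m : Int) + 1)).mp hc))]
        have hset : (acc ++ List.replicate (L.toNat - m) ([""] : List String)).set (m : Int).toNat cur
            = (acc ++ [cur]) ++ List.replicate (L.toNat - (m + 1)) [""] := by
          rw [hrep, Int.toNat_natCast, ← hlen]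
          simp
        rw [hset]
        have hidx : ((pvFiltLt s ((m : Int) + 1) : Nat) : Int)
            = ((pvFiltLt s ((m : Int) + 1 + 1) : Nat) : Int) := by
          rw [pv_filtLt_succ s hsnd ((m : Int) + 1), if_neg hin]
          push_cast
          ring
        rw [hidx]

-- with a non-positive change line present, A's pointer sticks at the head of the sorted list
lemma pv_stall_A_step (d : PySem.Dict String (List String)) (h0 : Int) (t : List Int)
    (hh : h0 ≤ 0) (k : Nat) (l : List Int) (hl : ∀ i ∈ l, 0 ≤ i) :
    l.foldl (pvStepA d (h0 :: t)) (List.replicate k [""], 0, [""])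
      = (List.replicate k [""], 0, [""]) := by
  induction l with
  | nil => rfl
  | cons i l' ih =>
    rw [List.foldl_cons]
    have hstep : pvStepA d (h0 :: t) (List.replicate k [""], 0, [""]) i
        = (List.replicate k [""], 0, [""]) := by
      rw [pvStepA]
      rw [if_neg (by
        rintro ⟨-, hc⟩
        have h0i : (0 : Int) ≤ i := hl i List.mem_cons_self
        have : PySem.List.pyGet? (h0 :: t) ((0 : Nat) : Int) = some h0 := by
          rw [PySem.List.pyGet?_natCast]
          rfl
        rw [show (0 : Int) = ((0 : Nat) : Int) from rfl, this] at hc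
        have : h0 = i + 1 := by injection hc
        omega)]
      simp [List.set_replicate_self]
    rw [hstep]
    exact ih (fun j hj => hl j (List.mem_cons_of_mem i hj))

lemma pv_stall_A (ps : List (String × List String)) (L : Int) (s : List Int)
    (hs : s = PySem.List.sorted (ps.map (fun p => pvParse p.1)) (fun x => x) false)
    (hex : ∃ x ∈ ps.map (fun p => pvParse p.1), x ≤ 0) :
    (PySem.List.pyRange 0 L 1).foldl (pvStepA (PySem.Dict.mk ps) s)
        (List.replicate L.toNat [""], 0, [""])
      = (List.replicate L.toNat [""], 0, [""]) := by
  obtain ⟨x, hx, hx0⟩ := hex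
  have hxs : x ∈ s := by rw [hs]; exact (PySem.List.mem_sorted _ _ _ x).mpr hx
  cases hcs : s with
  | nil => rw [hcs] at hxs; simp at hxs
  | cons h0 t =>
    have hh0 : h0 ≤ x := by
      have hsort : PySem.List.sorted (ps.map (fun p => pvParse p.1)) (fun x => x) false = h0 :: t := by
        rw [← hs]; exact hcs
      simpa using PySem.List.key_head_sorted_le _ _ hsort x hx
    exact pv_stall_A_step _ h0 t (by omega) L.toNat _
      (fun i hi => ((PySem.List.mem_pyRange_one).mp hi).1)

-- B's fold over the change list is the recursive segment fill
lemma pv_seg_fold (L : Int) : ∀ (c : List (Int × List String)) (acc : List (List String)) (pos : Int) (v : List String),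
    (c.foldl pvStepBseg (acc, pos, v)).1
      ++ PySem.List.pyRepeat [(c.foldl pvStepBseg (acc, pos, v)).2.2]
          (L - (c.foldl pvStepBseg (acc, pos, v)).2.1)
      = acc ++ pvFill L pos v c := by
  intro c
  induction c with
  | nil =>
    intro acc pos v
    simp [pvFill, PySem.List.pyRepeat_singleton]
  | cons q r ih =>
    intro acc pos v
    obtain ⟨n, w⟩ := q
    rw [List.foldl_cons]
    have hstep : pvStepBseg (acc, pos, v) (n, w)
        = (acc ++ List.replicate (n - 1 - pos).toNat v, n - 1, w) := by
      rw [pvStepBseg]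
      simp [PySem.List.pyRepeat_singleton]
    rw [hstep, ih]
    simp [pvFill]

-- shifting the fill start by one line when every change is strictly later
lemma pvFill_shift (L pos : Int) (v : List String) (c : List (Int × List String))
    (hL : pos < L) (hk : ∀ q ∈ c, pos + 1 < q.1) :
    pvFill L pos v c = v :: pvFill L (pos + 1) v c := by
  cases c with
  | nil =>
    show List.replicate (L - pos).toNat v = v :: List.replicate (L - (pos + 1)).toNat v
    rw [show (L - pos).toNat = (L - (pos + 1)).toNat + 1 by omega, List.replicate_succ]
  | cons q r =>
    obtain ⟨n, w⟩ := q
    have hn : pos + 1 < n := hk (n, w) List.mem_cons_self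
    show List.replicate (n - 1 - pos).toNat v ++ pvFill L (n - 1) w r
        = v :: (List.replicate (n - 1 - (pos + 1)).toNat v ++ pvFill L (n - 1) w r)
    rw [show (n - 1 - pos).toNat = (n - 1 - (pos + 1)).toNat + 1 by omega, List.replicate_succ]
    simp

-- a run of lines with no change appends the current value each time
lemma pv_missrun (d : PySem.Dict Int (List String)) :
    ∀ (k : Nat) (pos : Int) (acc : List (List String)) (v : List String),
    (∀ m : Int, pos < m → m ≤ pos + k → d.get? m = none) →
    (PySem.List.pyRange (pos + 1) (pos + k + 1) 1).foldl (pvStepB d) (acc, v)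
      = (acc ++ List.replicate k v, v) := by
  intro k
  induction k with
  | zero =>
    intro pos acc v _
    rw [PySem.List.pyRange_one_eq_nil (by omega)]
    simp
  | succ k ih =>
    intro pos acc v hmiss
    have hr : PySem.List.pyRange (pos + 1) (pos + (k + 1 : Nat) + 1) 1
        = PySem.List.pyRange (pos + 1) (pos + k + 1) 1 ++ [pos + k + 1] := by
      rw [show (pos + (k + 1 : Nat) + 1) = (pos + k + 1) + 1 by push_cast; ring]
      exact PySem.List.pyRange_one_succ_right (by omega)
    rw [hr, List.foldl_append, ih pos acc v (fun m h1 h2 => hmiss m h1 (by push_cast; omega))]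
    simp only [List.foldl_cons, List.foldl_nil]
    rw [pvStepB, hmiss (pos + k + 1) (by omega) (by push_cast; omega)]
    simp [List.replicate_succ']

-- the middle per-line dict fill equals the segment fill over the sorted change list
lemma pv_mid_fill (d : PySem.Dict Int (List String)) (L : Int) :
    ∀ (c : List (Int × List String)) (pos : Int) (acc : List (List String)) (v : List String),
    c.Pairwise (fun a b => a.1 < b.1) →
    (∀ q ∈ c, pos < q.1 ∧ q.1 ≤ L) →
    (∀ m w, pos < m → m ≤ L → (d.get? m = some w ↔ (m, w) ∈ c)) →
    ((PySem.List.pyRange (pos + 1) (L + 1) 1).foldl (pvStepB d) (acc, v)).1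
      = acc ++ pvFill L pos v c := by
  intro c
  induction c with
  | nil =>
    intro pos acc v _ _ hd
    by_cases hpl : pos ≤ L
    · have hnone : ∀ m : Int, pos < m → m ≤ pos + (L - pos).toNat → d.get? m = none := by
        intro m h1 h2
        cases hg : d.get? m with
        | none => rfl
        | some w =>
          exact absurd ((hd m w h1 (by omega)).mp hg) (by simp)
      have := pv_missrun d (L - pos).toNat pos acc v hnone
      rw [show (L + 1) = pos + ((L - pos).toNat : Int) + 1 by omega, this]
      rfl
    · rw [PySem.List.pyRange_one_eq_nil (by omega)]
      show acc = acc ++ List.replicate (L - pos).toNat v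
      rw [show (L - pos).toNat = 0 by omega]
      simp
  | cons q r ih =>
    intro pos acc v hpw hrange hd
    obtain ⟨n, w⟩ := q
    rw [List.pairwise_cons] at hpw
    obtain ⟨hnr, hpwr⟩ := hpw
    obtain ⟨hposn, hnL⟩ := hrange (n, w) List.mem_cons_self
    -- lines pos+1 .. n-1 miss
    have hnone : ∀ m : Int, pos < m → m ≤ pos + (n - 1 - pos).toNat → d.get? m = none := by
      intro m h1 h2
      cases hg : d.get? m with
      | none => rfl
      | some w' =>
        have hm : (m, w') ∈ (n, w) :: r := (hd m w' h1 (by omega)).mp hg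
        rcases List.mem_cons.mp hm with he | hm'
        · exfalso; have : m = n := congrArg Prod.fst he; omega
        · exfalso; have := hnr (m, w') hm'; simp at this; omega
    have hsplit : PySem.List.pyRange (pos + 1) (L + 1) 1
        = PySem.List.pyRange (pos + 1) n 1 ++ PySem.List.pyRange n (L + 1) 1 :=
      PySem.List.pyRange_one_append _ _ _ (by omega) (by omega)
    have hrun : (PySem.List.pyRange (pos + 1) n 1).foldl (pvStepB d) (acc, v)
        = (acc ++ List.replicate (n - 1 - pos).toNat v, v) := by
      have := pv_missrun d (n - 1 - pos).toNat pos acc v hnone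
      have hre : PySem.List.pyRange (pos + 1) n 1
          = PySem.List.pyRange (pos + 1) (pos + ((n - 1 - pos).toNat : Int) + 1) 1 := by
        congr 1; omega
      rw [hre]
      exact this
    rw [hsplit, List.foldl_append, hrun,
      PySem.List.pyRange_one_cons (by omega), List.foldl_cons]
    have hgetn : d.get? n = some w :=
      (hd n w hposn hnL).mpr List.mem_cons_self
    rw [pvStepB, hgetn]
    have hdr : ∀ m w', n < m → m ≤ L → (d.get? m = some w' ↔ (m, w') ∈ r) := by
      intro m w' h1 h2
      rw [hd m w' (by omega) h2, List.mem_cons]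
      constructor
      · rintro (he | hm)
        · exfalso; have : m = n := congrArg Prod.fst he; omega
        · exact hm
      · intro hm; exact Or.inr hm
    have hrr : ∀ q ∈ r, n < q.1 ∧ q.1 ≤ L := by
      intro q hq
      exact ⟨by have := hnr q hq; simpa using this, (hrange q (List.mem_cons_of_mem _ hq)).2⟩
    rw [ih n (acc ++ List.replicate (n - 1 - pos).toNat v ++ [w]) w hpwr hrr hdr]
    show acc ++ List.replicate (n - 1 - pos).toNat v ++ [w] ++ pvFill L n w r
        = acc ++ (List.replicate (n - 1 - pos).toNat v ++ pvFill L (n - 1) w r)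
    rw [pvFill_shift L (n - 1) w r (by omega) (by intro q hq; have := hrr q hq; omega)]
    simp

-- the middle dict agrees, on lines 1..L, with membership in B's sorted in-range change list
lemma pv_dict_iff (ps : List (String × List String)) (L : Int)
    (hnum : (ps.map (fun p => pvParse p.1)).Nodup) :
    ∀ (m : Int) (w : List String), 0 < m → m ≤ L →
    ((pvChangeDict ps).get? m = some w ↔ (m, w) ∈ pvChangesB ps L) := by
  intro m w h1 h2
  rw [pvChangesB, PySem.List.mem_sorted]
  constructor
  · intro hg
    rw [pvChangeDict, pv_changes_get? ps m hnum] at hg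
    cases hf : ps.find? (fun p => pvParse p.1 == m) with
    | none => rw [hf] at hg; simp [PySem.Dict.get?, PySem.Dict.empty] at hg
    | some p =>
      rw [hf] at hg
      have hp : p ∈ ps := List.mem_of_find?_eq_some hf
      have hpn : pvParse p.1 = m := by simpa using List.find?_some hf
      simp only [Option.some.injEq] at hg
      refine List.mem_map.mpr ⟨p, List.mem_filter.mpr ⟨hp, ?_⟩, by rw [hpn, hg]⟩
      simp only [Bool.and_eq_true, decide_eq_true_eq]
      omega
  · intro hm
    obtain ⟨p, hpf, hpe⟩ := List.mem_map.mp hm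
    have hp : p ∈ ps := (List.mem_filter.mp hpf).1
    have hpn : pvParse p.1 = m := congrArg Prod.fst hpe
    have hpv : p.2 = w := congrArg Prod.snd hpe
    rw [← hpn, ← hpv]
    exact pv_get_self ps hnum p hp

-- B's sorted change list is strictly increasing in its line numbers, which lie in 1..L
lemma pv_changes_pairwise (ps : List (String × List String)) (L : Int)
    (hnum : (ps.map (fun p => pvParse p.1)).Nodup) :
    (pvChangesB ps L).Pairwise (fun a b => a.1 < b.1) := by
  have hle : (pvChangesB ps L).Pairwise (fun a b => a.1 ≤ b.1) := by
    simpa using PySem.List.sorted_pairwise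
      ((ps.filter (fun p => decide (1 ≤ pvParse p.1) && decide (pvParse p.1 ≤ L))).map
        (fun p => (pvParse p.1, p.2))) (fun q => q.1)
  have hkeys : ((pvChangesB ps L).map Prod.fst).Nodup := by
    have hperm : (pvChangesB ps L).Perm
        ((ps.filter (fun p => decide (1 ≤ pvParse p.1) && decide (pvParse p.1 ≤ L))).map
          (fun p => (pvParse p.1, p.2))) := PySem.List.sorted_perm _ _ _
    refine (hperm.map Prod.fst).nodup_iff.mpr ?_
    rw [List.map_map]
    have hsub : List.Sublist
        ((ps.filter (fun p => decide (1 ≤ pvParse p.1) && decide (pvParse p.1 ≤ L))).map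
          (Prod.fst ∘ fun p => (pvParse p.1, p.2)))
        (ps.map (fun p => pvParse p.1)) :=
      List.Sublist.map _ List.filter_sublist
    exact hnum.sublist hsub
  have hne : (pvChangesB ps L).Pairwise (fun a b => a.1 ≠ b.1) := by
    rw [List.Nodup, List.pairwise_map] at hkeys
    exact hkeys
  exact (hle.and hne).imp (fun h => lt_of_le_of_ne h.1 h.2)

lemma pv_changes_range (ps : List (String × List String)) (L : Int) :
    ∀ q ∈ pvChangesB ps L, 0 < q.1 ∧ q.1 ≤ L := by
  intro q hq
  rw [pvChangesB, PySem.List.mem_sorted] at hq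
  obtain ⟨p, hpf, hpe⟩ := List.mem_map.mp hq
  have hc := (List.mem_filter.mp hpf).2
  simp only [Bool.and_eq_true, decide_eq_true_eq] at hc
  have : q.1 = pvParse p.1 := by rw [← hpe]
  omega

-- an in-range change of ps appears in B's change list under its parsed line number
lemma pv_mem_changes (ps : List (String × List String)) (L : Int)
    (q : String × List String) (hq : q ∈ ps)
    (h1 : 1 ≤ pvParse q.1) (h2 : pvParse q.1 ≤ L) :
    (pvParse q.1, q.2) ∈ pvChangesB ps L := by
  rw [pvChangesB, PySem.List.mem_sorted]
  refine List.mem_map.mpr ⟨q, List.mem_filter.mpr ⟨hq, ?_⟩, rfl⟩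
  simp only [Bool.and_eq_true, decide_eq_true_eq]
  exact ⟨h1, h2⟩

-- when every in-range change carries [''], the fill is constant
lemma pv_fill_const (L : Int) (v : List String) :
    ∀ (c : List (Int × List String)) (pos : Int),
    (∀ q ∈ c, q.2 = v) → (∀ q ∈ c, pos < q.1 ∧ q.1 ≤ L) →
    c.Pairwise (fun a b => a.1 < b.1) →
    pvFill L pos v c = List.replicate (L - pos).toNat v := by
  intro c
  induction c with
  | nil => intro pos _ _ _; rfl
  | cons q r ih =>
    intro pos hval hrange hpw
    obtain ⟨n, w⟩ := q
    rw [List.pairwise_cons] at hpw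
    obtain ⟨hnr, hpwr⟩ := hpw
    obtain ⟨h1, h2⟩ := hrange (n, w) List.mem_cons_self
    have hw : w = v := hval (n, w) List.mem_cons_self
    show List.replicate (n - 1 - pos).toNat v ++ pvFill L (n - 1) w r = _
    rw [hw, ih (n - 1) (fun q hq => hval q (List.mem_cons_of_mem _ hq))
      (fun q hq => ⟨by have := hnr q hq; simp at this; omega, (hrange q (List.mem_cons_of_mem _ hq)).2⟩) hpwr]
    rw [← List.replicate_add]
    congr 1
    omega

-- the fill puts each change's value at its own (0-based) line index
lemma pv_fill_elem (L : Int) :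
    ∀ (c : List (Int × List String)) (pos : Int) (v : List String) (n : Int) (w : List String),
    c.Pairwise (fun a b => a.1 < b.1) →
    (∀ q ∈ c, pos < q.1 ∧ q.1 ≤ L) →
    (n, w) ∈ c →
    (pvFill L pos v c)[(n - 1 - pos).toNat]? = some w := by
  intro c
  induction c with
  | nil => intro pos v n w _ _ hm; simp at hm
  | cons q r ih =>
    intro pos v n w hpw hrange hm
    obtain ⟨n1, w1⟩ := q
    rw [List.pairwise_cons] at hpw
    obtain ⟨hnr, hpwr⟩ := hpw
    obtain ⟨h1, h2⟩ := hrange (n1, w1) List.mem_cons_self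
    show (List.replicate (n1 - 1 - pos).toNat v ++ pvFill L (n1 - 1) w1 r)[(n - 1 - pos).toNat]? = some w
    rcases List.mem_cons.mp hm with he | hm'
    · rw [Prod.mk.injEq] at he
      obtain ⟨rfl, rfl⟩ := he
      rw [List.getElem?_append_right (by simp)]
      have hz : (n - 1 - pos).toNat - (List.replicate (n - 1 - pos).toNat v).length = 0 := by simp
      rw [hz, pvFill_shift L (n - 1) w r (by omega)
        (by intro q hq; have := hnr q hq; simp at this; omega)]
      rfl
    · have hgt : n1 < n := by have := hnr (n, w) hm'; simpa using this
      rw [List.getElem?_append_right (by simp; omega)]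
      have : (n - 1 - pos).toNat - (List.replicate (n1 - 1 - pos).toNat v).length
          = (n - 1 - (n1 - 1)).toNat := by simp; omega
      rw [this]
      exact ih (n1 - 1) w1 n w hpwr
        (fun q hq => ⟨by have := hnr q hq; simp at this; omega, (hrange q (List.mem_cons_of_mem _ hq)).2⟩) hm'

-- ===== VERDICT (by name: the statement is the Claim_ definition above) =====
theorem generateExpectedTokenStrings_spec : Claim_unchanged_generateExpectedTokenStrings := by
  intro ps L _ hpre hnD
  obtain ⟨hnd, hparse, hnum, hcanonL⟩ := hpre
  unfold generateExpectedTokenStrings generateExpectedTokenStrings_alt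
  have hfold : (PySem.Dict.mk ps).keys.foldl (fun acc key => acc ++ [pvParse key]) []
      = ps.map (fun p => pvParse p.1) := by
    rw [PySem.List.foldl_append_singleton_eq_map, PySem.Dict.keys_mk, List.map_map]
    rfl
  simp only [hfold, PySem.List.pyRepeat_singleton]
  have hseg := pv_seg_fold L (pvChangesB ps L) [] 0 [""]
  simp only [List.nil_append, PySem.List.pyRepeat_singleton] at hseg
  rw [hseg]
  have hrA : PySem.List.pyRange 0 L 1 = PySem.List.pyRange 0 ((L.toNat : Nat) : Int) 1 := by
    by_cases h : 0 ≤ L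
    · rw [Int.toNat_of_nonneg h]
    · rw [PySem.List.pyRange_one_eq_nil (by omega), PySem.List.pyRange_one_eq_nil (by omega)]
  have hrB : PySem.List.pyRange 1 (L + 1) 1 = PySem.List.pyRange 1 (((L.toNat : Nat) : Int) + 1) 1 := by
    by_cases h : 0 ≤ L
    · rw [Int.toNat_of_nonneg h]
    · rw [PySem.List.pyRange_one_eq_nil (by omega), PySem.List.pyRange_one_eq_nil (by omega)]
  by_cases hpos : ∀ p ∈ ps, 1 ≤ pvParse p.1
  · obtain ⟨acc, cur, hB1, hlen, hA⟩ :=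
      pv_loop ps L hnd hnum (hcanonL hpos) hpos _ rfl L.toNat (le_refl _)
    have hmid := pv_mid_fill (pvChangeDict ps) L (pvChangesB ps L) 0 [] [""]
      (pv_changes_pairwise ps L hnum) (pv_changes_range ps L)
      (fun m w h1 h2 => pv_dict_iff ps L hnum m w h1 h2)
    norm_num at hmid
    rw [hrB] at hmid
    rw [hB1] at hmid
    rw [hrA, hA]
    simpa using hmid
  · push Not at hpos
    obtain ⟨p0, hp0, hp0n⟩ := hpos
    have hvals : ∀ q ∈ ps, 1 ≤ pvParse q.1 → pvParse q.1 ≤ L → q.2 = [""] := by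
      intro q hq h1 h2
      by_contra hne
      exact hnD ⟨⟨p0, hp0, by omega⟩, ⟨q, hq, h1, h2, hne⟩⟩
    have hstA := pv_stall_A ps L _ rfl ⟨pvParse p0.1, List.mem_map_of_mem hp0, by omega⟩
    rw [hstA]
    have hcv : ∀ q ∈ pvChangesB ps L, q.2 = [""] := by
      intro q hq
      have hmem := hq
      rw [pvChangesB, PySem.List.mem_sorted] at hmem
      obtain ⟨p, hpf, hpe⟩ := List.mem_map.mp hmem
      obtain ⟨hp, hc⟩ := List.mem_filter.mp hpf
      simp only [Bool.and_eq_true, decide_eq_true_eq] at hc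
      have : q.2 = p.2 := by rw [← hpe]
      rw [this]
      exact hvals p hp hc.1 hc.2
    rw [pv_fill_const L [""] (pvChangesB ps L) 0 hcv
      (fun q hq => (pv_changes_range ps L q hq)) (pv_changes_pairwise ps L hnum)]
    simp

theorem generateExpectedTokenStrings_changed : Claim_changed_generateExpectedTokenStrings := by
  unfold Claim_changed_generateExpectedTokenStrings
  decide

theorem generateExpectedTokenStrings_tight : Claim_exact_generateExpectedTokenStrings := by
  intro ps L _ hpre hD
  obtain ⟨hnd, hparse, hnum, hcanonL⟩ := hpre
  obtain ⟨⟨p0, hp0, hp00⟩, ⟨q, hq, hq1, hqL, hqv⟩⟩ := hD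
  intro heq
  unfold generateExpectedTokenStrings generateExpectedTokenStrings_alt at heq
  have hfold : (PySem.Dict.mk ps).keys.foldl (fun acc key => acc ++ [pvParse key]) []
      = ps.map (fun p => pvParse p.1) := by
    rw [PySem.List.foldl_append_singleton_eq_map, PySem.Dict.keys_mk, List.map_map]
    rfl
  simp only [hfold, PySem.List.pyRepeat_singleton] at heq
  have hstA := pv_stall_A ps L _ rfl ⟨pvParse p0.1, List.mem_map_of_mem hp0, by omega⟩
  have hseg := pv_seg_fold L (pvChangesB ps L) [] 0 [""]
  simp only [List.nil_append, PySem.List.pyRepeat_singleton] at hseg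
  rw [hstA, hseg] at heq
  have helem := pv_fill_elem L (pvChangesB ps L) 0 [""] (pvParse q.1) q.2
    (pv_changes_pairwise ps L hnum) (pv_changes_range ps L)
    (pv_mem_changes ps L q hq hq1 hqL)
  rw [← heq] at helem
  have hidx : (pvParse q.1 - 1 - 0).toNat < L.toNat := by omega
  rw [List.getElem?_replicate] at helem
  rw [if_pos hidx] at helem
  have : ([""] : List String) = q.2 := by injection helem
  exact hqv this.symm
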